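-- pv_equiv track=rewrite | github.com/ccdunn/riddler | riddler_20250411.py | j_of_k_checker
-- ===== SOURCE A (Python) =====
-- def j_of_k_checker(pattern, j_of_ks):
--     pattern_len = len(pattern)
--     for j_of_k in j_of_ks:
--         j, k = j_of_k
--         if pattern_len < k:
--             if j - len(set(pattern)) > k - pattern_len:
--                 return False
--         else:
--             if len(set(pattern[-k:])) < j:
--                 return False
--     return True
-- ===== SOURCE B (Python) =====
-- def j_of_k_checker(pattern, j_of_ks):
--     # One backward pass builds d[i] = number of distinct elements in pattern[i:];
--     # each (j, k) query is then answered by a single array lookup.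
--     n = len(pattern)
--     d = [0] * (n + 1)
--     seen = set()
--     for i in reversed(range(n)):
--         seen.add(pattern[i])
--         d[i] = len(seen)
--     for j, k in j_of_ks:
--         if k > n:
--             if j - d[0] > k - n:
--                 return False
--         elif d[n - max(k, 0)] < j:
--             return False
--     return True
-- ===== Notes on version B (the rewrite author's own statement) =====
-- stated objective: alternative
-- what changed: B precomputes the suffix distinct-count array d[i] = len(set(pattern[i:])) in one backward pass and answers each (j,k) query with an O(1) lookup, instead of A building a fresh set of the suffix per query; Pre_ excludes inputs with a query whose k is nonpositive and 1 <= j <= len(pattern)+k, where A's pattern[-k:] slices from the front (the whole list for k=0) as an artefact of Python slicing, while B treats a nonpositive-length suffix as empty.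
-- outside the precondition, e.g. on j_of_k_checker([1, 2], [(1, 0)]): A returns True, B returns False
import Mathlib
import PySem

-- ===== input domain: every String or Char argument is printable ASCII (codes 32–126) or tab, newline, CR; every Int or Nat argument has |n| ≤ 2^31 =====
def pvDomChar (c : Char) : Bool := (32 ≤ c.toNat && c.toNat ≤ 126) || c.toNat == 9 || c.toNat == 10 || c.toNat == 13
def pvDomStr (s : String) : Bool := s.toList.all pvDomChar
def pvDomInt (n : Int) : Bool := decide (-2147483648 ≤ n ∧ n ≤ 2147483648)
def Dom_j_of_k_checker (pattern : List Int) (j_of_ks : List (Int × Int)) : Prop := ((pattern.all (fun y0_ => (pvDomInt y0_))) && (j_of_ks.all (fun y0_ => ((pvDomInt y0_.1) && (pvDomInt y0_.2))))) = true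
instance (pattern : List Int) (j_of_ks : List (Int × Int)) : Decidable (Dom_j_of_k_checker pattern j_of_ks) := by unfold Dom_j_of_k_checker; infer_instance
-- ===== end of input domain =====

-- B builds the suffix distinct-count array in one backward pass and answers each (j,k)
-- query with one array lookup, instead of A's per-query set construction (a different
-- algorithm; not measurably faster on the timed inputs, where A returns early).

-- ===== PORT A =====
-- the for-loop with early 'return False' becomes structural recursion over j_of_ks
def jofkLoopA (pattern : List Int) (pattern_len : Int) : List (Int × Int) → Bool
  | [] => true
  | (j, k) :: rest =>
    if pattern_len < k then
      if j - ((PySem.Set.ofList pattern).length : Int) > k - pattern_len then false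
      else jofkLoopA pattern pattern_len rest
    else
      if ((PySem.Set.ofList (PySem.List.slice pattern (some (-k)) none)).length : Int) < j then false
      else jofkLoopA pattern pattern_len rest

def j_of_k_checker (pattern : List Int) (j_of_ks : List (Int × Int)) : Bool :=
  jofkLoopA pattern (pattern.length : Int) j_of_ks

-- ===== PORT B =====
-- Source B's backward pass (seen-set + d array) as structural recursion from the right:
-- returns (d, seen) with d[i] = len(set(pattern[i:])), d[n] = 0, seen = set(pattern)
def suffixAux : List Int → List Int × PySem.Set Int
  | [] => ([0], PySem.Set.empty)
  | x :: xs =>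
    let p := suffixAux xs
    let s := PySem.Set.add p.2 x
    (((s.length : Int)) :: p.1, s)

-- Source B's query loop; the index n - max(k,0) is always in range, so pyGetD is exact here
def jofkLoopB (d : List Int) (n : Int) : List (Int × Int) → Bool
  | [] => true
  | (j, k) :: rest =>
    if k > n then
      if j - PySem.List.pyGetD d 0 0 > k - n then false
      else jofkLoopB d n rest
    else
      if PySem.List.pyGetD d (n - max k 0) 0 < j then false
      else jofkLoopB d n rest

def j_of_k_checker_alt (pattern : List Int) (j_of_ks : List (Int × Int)) : Bool :=
  jofkLoopB (suffixAux pattern).1 (pattern.length : Int) j_of_ks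

-- ===== PRECONDITION & SPEC =====
-- Pre_ excludes inputs containing a query with nonpositive k and 1 ≤ j ≤ len(pattern)+k
-- (so A's accidental slice holds at least j elements): there A's pattern[-k:] slices from
-- the front (the whole list for k = 0) as an artefact of Python slicing on a corner no
-- spec would fix, while B's natural reading of a nonpositive-length suffix is the empty one.
def Pre_j_of_k_checker (pattern : List Int) (j_of_ks : List (Int × Int)) : Prop :=
  ∀ q ∈ j_of_ks, ¬ (q.2 ≤ 0 ∧ 1 ≤ q.1 ∧ q.1 ≤ (pattern.length : Int) + q.2)
instance (pattern : List Int) (j_of_ks : List (Int × Int)) : Decidable (Pre_j_of_k_checker pattern j_of_ks) := by unfold Pre_j_of_k_checker; infer_instance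

def pvWitness_j_of_k_checker : List Int × (List (Int × Int)) := ([1, 2, 1], [(2, 2), (0, -1), (3, 5)])

def Spec_j_of_k_checker (pattern : List Int) (j_of_ks : List (Int × Int)) (out : Bool) : Prop := out = j_of_k_checker_alt pattern j_of_ks
instance (pattern : List Int) (j_of_ks : List (Int × Int)) (out : Bool) : Decidable (Spec_j_of_k_checker pattern j_of_ks out) := by unfold Spec_j_of_k_checker; infer_instance

-- ===== CLAIM (what is proved, stated in full; the proofs are below) =====
def Claim_equal_j_of_k_checker : Prop := ∀ (pattern : List Int) (j_of_ks : List (Int × Int)), Dom_j_of_k_checker pattern j_of_ks → Pre_j_of_k_checker pattern j_of_ks → Spec_j_of_k_checker pattern j_of_ks (j_of_k_checker pattern j_of_ks)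

-- ===== LEMMAS AND PROOFS =====

-- the seen-set accumulated by suffixAux is a nodup list holding exactly the elements of xs
lemma suffixAux_seen (xs : List Int) :
    (suffixAux xs).2.Nodup ∧ ∀ y, y ∈ (suffixAux xs).2 ↔ y ∈ xs := by
  induction xs with
  | nil => exact ⟨List.nodup_nil, by intro y; simp [suffixAux, PySem.Set.empty]⟩
  | cons x xs ih =>
    refine ⟨PySem.Set.nodup_add _ _ ih.1, fun y => ?_⟩
    rw [suffixAux]
    simp only [PySem.Set.mem_add, ih.2, List.mem_cons]
    tauto

-- any nodup list with the same members as xs has the length of set(xs)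
lemma len_eq_ofList (s xs : List Int) (hn : s.Nodup) (hm : ∀ y, y ∈ s ↔ y ∈ xs) :
    s.length = (PySem.Set.ofList xs).length := by
  have h1 := List.toFinset_card_of_nodup hn
  have h2 := List.toFinset_card_of_nodup (PySem.Set.nodup_ofList xs)
  have h3 : s.toFinset = (PySem.Set.ofList xs).toFinset := by
    ext y; simp [List.mem_toFinset, hm, PySem.Set.mem_ofList]
  rw [h3] at h1
  omega

-- characterisation of the d array: d[i] = len(set(xs[i:])) for 0 ≤ i ≤ len(xs)
lemma suffixAux_d (xs : List Int) :
    (suffixAux xs).1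
      = (List.range (xs.length + 1)).map (fun i => ((PySem.Set.ofList (xs.drop i)).length : Int)) := by
  induction xs with
  | nil => simp [suffixAux, PySem.Set.ofList]
  | cons x xs ih =>
    have hseen := suffixAux_seen xs
    have hhead : ((suffixAux xs).2.add x).length = (PySem.Set.ofList (x :: xs)).length := by
      refine len_eq_ofList _ _ (PySem.Set.nodup_add _ _ hseen.1) fun y => ?_
      simp only [PySem.Set.mem_add, hseen.2, List.mem_cons]; tauto
    rw [suffixAux]
    simp only [List.length_cons]
    rw [List.range_succ_eq_map, List.map_cons, List.map_map]
    refine List.cons_eq_cons.mpr ⟨by simpa using hhead, ?_⟩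
    rw [ih]
    exact List.map_congr_left (fun i _ => by simp)

lemma suffixAux_get (xs : List Int) (s : Nat) (hs : s ≤ xs.length) :
    PySem.List.pyGetD (suffixAux xs).1 (s : Int) 0
      = ((PySem.Set.ofList (xs.drop s)).length : Int) := by
  rw [PySem.List.pyGetD_natCast, suffixAux_d,
      PySem.List.getD_map_range _ _ _ _ (by omega)]

-- the else-branch for positive k ≤ len: B's lookup equals A's distinct count of pattern[-k:]
lemma lookup_eq_slice_pos (xs : List Int) (k : Int) (hk0 : 0 < k) (hk : ¬ ((xs.length : Int) < k)) :
    PySem.List.pyGetD (suffixAux xs).1 ((xs.length : Int) - max k 0) 0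
      = ((PySem.Set.ofList (PySem.List.slice xs (some (-k)) none)).length : Int) := by
  rw [PySem.List.slice_some_none]
  have hc : PySem.List.clampIdx xs.length (-k) = xs.length - k.toNat := by
    rw [show (-k) = -((k.toNat : Nat) : Int) by omega]
    exact PySem.List.clampIdx_neg_natCast _ _ (by omega)
  have hcast : (xs.length : Int) - max k 0 = ((xs.length - k.toNat : Nat) : Int) := by omega
  rw [hc, hcast, suffixAux_get _ _ (by omega)]

-- for nonpositive k, B's lookup reads d[len] = 0 (the empty suffix)
lemma lookup_nonpos (xs : List Int) (k : Int) (hk0 : k ≤ 0) :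
    PySem.List.pyGetD (suffixAux xs).1 ((xs.length : Int) - max k 0) 0 = 0 := by
  have hcast : (xs.length : Int) - max k 0 = ((xs.length : Nat) : Int) := by omega
  rw [hcast, suffixAux_get _ _ (le_refl _)]
  simp [PySem.Set.ofList]

-- the distinct count of a list never exceeds its length
lemma ofList_len_le (l : List Int) : (PySem.Set.ofList l).length ≤ l.length := by
  have h1 := List.toFinset_card_of_nodup (PySem.Set.nodup_ofList l)
  have h2 : (PySem.Set.ofList l).toFinset = l.toFinset := by
    ext y; simp [List.mem_toFinset, PySem.Set.mem_ofList]
  have h3 := List.toFinset_card_le l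
  rw [h2] at h1
  omega

lemma loop_eq (pattern : List Int) (qs : List (Int × Int))
    (hpre : ∀ q ∈ qs, ¬ (q.2 ≤ 0 ∧ 1 ≤ q.1 ∧ q.1 ≤ (pattern.length : Int) + q.2)) :
    jofkLoopA pattern (pattern.length : Int) qs
      = jofkLoopB (suffixAux pattern).1 (pattern.length : Int) qs := by
  induction qs with
  | nil => rfl
  | cons q rest ih =>
    obtain ⟨j, k⟩ := q
    have hq := hpre (j, k) (List.mem_cons_self)
    have ih' := ih (fun q hq => hpre q (List.mem_cons_of_mem _ hq))
    simp only [jofkLoopA, jofkLoopB]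
    by_cases h : ((pattern.length : Int) < k)
    · have h0 : PySem.List.pyGetD (suffixAux pattern).1 0 0
          = ((PySem.Set.ofList pattern).length : Int) := by
        have := suffixAux_get pattern 0 (by omega)
        simpa using this
      rw [if_pos h, if_pos (show k > (pattern.length : Int) from h), h0, ih']
    · rw [if_neg h, if_neg (show ¬ k > (pattern.length : Int) from h)]
      by_cases hk0 : 0 < k
      · rw [lookup_eq_slice_pos pattern k hk0 h, ih']
      · -- k ≤ 0: B reads d[len] = 0; Pre_ gives j ≤ 0 or len ≤ -k, and in both
        -- cases A's count of the accidental slice compares to j the same way 0 does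
        have hk0' : k ≤ 0 := by omega
        rw [lookup_nonpos pattern k hk0', ih']
        by_cases hj : 1 ≤ j
        · -- j exceeds the accidental slice's n+k elements: both checks fail, both return false
          have hn : ¬ (j ≤ (pattern.length : Int) + k) := by tauto
          have hslice : (PySem.List.slice pattern (some (-k)) none).length
              = pattern.length - min (-k).toNat pattern.length := by
            rw [PySem.List.slice_some_none]
            have hc : PySem.List.clampIdx pattern.length (-k) = min (-k).toNat pattern.length := by
              rw [show (-k) = (((-k).toNat : Nat) : Int) by omega]
              exact PySem.List.clampIdx_natCast _ _
            rw [hc, List.length_drop]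
          have hle := ofList_len_le (PySem.List.slice pattern (some (-k)) none)
          have htn : ((-k).toNat : Int) = -k := by omega
          have hA : ((PySem.Set.ofList (PySem.List.slice pattern (some (-k)) none)).length : Int) < j := by
            rw [hslice] at hle
            omega
          rw [if_pos hA, if_pos (show (0:Int) < j by omega)]
        · -- j ≤ 0: a count below j is impossible, and so is 0 < j — both loops continue
          have hA : ¬ (((PySem.Set.ofList (PySem.List.slice pattern (some (-k)) none)).length : Int) < j) := by
            have : (0:Int) ≤ ((PySem.Set.ofList (PySem.List.slice pattern (some (-k)) none)).length : Int) :=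
              Int.natCast_nonneg _
            omega
          rw [if_neg hA, if_neg (show ¬ ((0:Int) < j) by omega)]

-- ===== VERDICT (by name: the statement is the Claim_ definition above) =====
theorem j_of_k_checker_spec : Claim_equal_j_of_k_checker := by
  intro pattern j_of_ks _ hpre
  unfold Spec_j_of_k_checker j_of_k_checker j_of_k_checker_alt
  exact loop_eq pattern j_of_ks hpre
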